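-- pv_equiv track=rewrite | github.com/Sandeepdwivediii/Search-IQ | intent_search_project/scripts/ai_dependency_generator.py | build_dependency_chain
-- ===== SOURCE A (Python) =====
-- def build_dependency_chain(deps):
--     """Build the dependency chain"""
--     # Find start
--     start = None
--     for item, deps_list in deps.items():
--         if not deps_list:
--             start = item
--             break
--
--     if not start:
--         return list(deps.keys())
--
--     # Build chain
--     chain = [start]
--     while True:
--         current = chain[-1]
--         next_item = None
--
--         for item, deps_list in deps.items():
--             if item not in chain and current in deps_list:
--                 next_item = item
--                 break
--
--         if next_item:
--             chain.append(next_item)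
--         else:
--             break
--
--     return chain
-- ===== SOURCE B (Python) =====
-- def build_dependency_chain(deps):
--     """Build the dependency chain"""
--     # Find start (a falsy start -- none found, or the empty-string name -- means no usable start)
--     start = None
--     for item, deps_list in deps.items():
--         if not deps_list:
--             start = item
--             break
--
--     if not start:
--         return list(deps.keys())
--
--     # Reverse map: dep -> the items (in dict order) that list it as a dependency
--     rev = {}
--     for item, deps_list in deps.items():
--         for dep in dict.fromkeys(deps_list):
--             rev.setdefault(dep, []).append(item)
--
--     chain = [start]
--     in_chain = {start}
--     while True:
--         nxt = None
--         for item in rev.get(chain[-1], ()):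
--             if item not in in_chain:
--                 nxt = item
--                 break
--         if not nxt:
--             break
--         chain.append(nxt)
--         in_chain.add(nxt)
--     return chain
-- ===== Notes on version B (the rewrite author's own statement) =====
-- stated objective: alternative
-- what changed: Instead of rescanning every dict entry (with an O(chain) 'item not in chain' list test) on each chain step, B precomputes one reverse map dep->ordered dependants and keeps a set of chain members, so each step only scans the current item's dependants with O(1) membership tests; intended as faster on long chains (A O(n^3) worst, B O(n+deps) typical), but a timing run's inputs produce short chains and measured only 1.31x at the largest size, so no speed is claimed.
import Mathlib
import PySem

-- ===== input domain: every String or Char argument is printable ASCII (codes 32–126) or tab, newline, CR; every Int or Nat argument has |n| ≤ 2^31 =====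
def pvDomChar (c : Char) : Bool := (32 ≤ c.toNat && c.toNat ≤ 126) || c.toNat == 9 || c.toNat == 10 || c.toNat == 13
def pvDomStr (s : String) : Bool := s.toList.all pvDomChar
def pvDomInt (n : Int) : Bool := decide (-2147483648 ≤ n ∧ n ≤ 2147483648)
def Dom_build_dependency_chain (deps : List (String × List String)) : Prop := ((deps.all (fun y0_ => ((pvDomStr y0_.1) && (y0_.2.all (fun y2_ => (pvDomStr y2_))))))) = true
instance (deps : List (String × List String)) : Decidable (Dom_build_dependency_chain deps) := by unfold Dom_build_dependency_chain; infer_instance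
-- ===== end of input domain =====

-- B replaces A's full rescan of the dict per chain step by a precomputed reverse
-- dependency map plus a set of chain members; return values agree on all inputs.

-- ===== PORT A =====
-- the 'while True' loop: each pass appends one further key not yet in the chain, so
-- deps.length passes always suffice (fuel is only a totality guard)
def chainLoopA (deps : List (String × List String)) : Nat → List String → List String
  | 0, chain => chain
  | fuel+1, chain =>
    match deps.find? (fun p => !decide (p.1 ∈ chain) && decide (chain.getLastD "" ∈ p.2)) with
    | some p => if p.1 = "" then chain else chainLoopA deps fuel (chain ++ [p.1])  -- 'if next_item:' — "" is falsy
    | none => chain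

def build_dependency_chain (deps : List (String × List String)) : List String :=
  match deps.find? (fun p => p.2.isEmpty) with
  | some p => if p.1 = "" then deps.map Prod.fst   -- 'if not start:' — "" is falsy
              else chainLoopA deps deps.length [p.1]
  | none => deps.map Prod.fst

-- ===== PORT B =====
-- rev.setdefault(dep, []).append(item) over dict.fromkeys(deps_list)
def revMap (deps : List (String × List String)) : PySem.Dict String (List String) :=
  deps.foldl (fun r p => (PySem.List.dedup p.2).foldl (fun r dp => r.modify dp [] (· ++ [p.1])) r)
    PySem.Dict.empty

def chainLoopB (rev : PySem.Dict String (List String)) :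
    Nat → List String → PySem.Set String → List String
  | 0, chain, _ => chain
  | fuel+1, chain, inChain =>
    match (rev.getD (chain.getLastD "") []).find? (fun x => !decide (x ∈ inChain)) with
    | some x => if x = "" then chain   -- 'if not nxt: break'
                else chainLoopB rev fuel (chain ++ [x]) (PySem.Set.add inChain x)
    | none => chain

def build_dependency_chain_alt (deps : List (String × List String)) : List String :=
  match deps.find? (fun p => p.2.isEmpty) with
  | some p => if p.1 = "" then deps.map Prod.fst
              else chainLoopB (revMap deps) deps.length [p.1] (PySem.Set.ofList [p.1])
  | none => deps.map Prod.fst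

-- ===== PRECONDITION & SPEC =====
def Spec_build_dependency_chain (deps : List (String × List String)) (out : List String) : Prop := out = build_dependency_chain_alt deps
instance (deps : List (String × List String)) (out : List String) : Decidable (Spec_build_dependency_chain deps out) := by unfold Spec_build_dependency_chain; infer_instance

-- ===== CLAIM (what is proved, stated in full; the proofs are below) =====
def Claim_equal_build_dependency_chain : Prop := ∀ (deps : List (String × List String)), Dom_build_dependency_chain deps → Spec_build_dependency_chain deps (build_dependency_chain deps)

-- ===== LEMMAS AND PROOFS =====

-- one item's 'for dep in dict.fromkeys(deps_list): rev.setdefault(dep, []).append(item)' pass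
lemma revMap_inner (ds : List String) (x : String) (r : PySem.Dict String (List String))
    (c : String) (hnd : ds.Nodup) :
    (ds.foldl (fun r dp => r.modify dp [] (· ++ [x])) r).getD c []
      = r.getD c [] ++ (if c ∈ ds then [x] else []) := by
  have h1 : ds.foldl (fun r dp => r.modify dp [] (· ++ [x])) r
      = (ds.map (fun dp => (dp, x))).foldl (fun d p => d.modify p.1 [] (· ++ [p.2])) r := by
    rw [List.foldl_map]
  rw [h1, PySem.Dict.getD_foldl_modify_append]
  congr 1
  rw [List.filter_map, List.map_map]
  have h2 : ds.filter ((fun p => p.1 == c) ∘ (fun dp => (dp, x))) = if c ∈ ds then [c] else [] := by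
    show ds.filter (fun dp => dp == c) = _
    rw [List.filter_beq]
    by_cases hc : c ∈ ds
    · rw [if_pos hc, List.count_eq_one_of_mem hnd hc, List.replicate_one]
    · rw [if_neg hc, List.count_eq_zero_of_not_mem hc, List.replicate_zero]
  rw [h2]
  by_cases hc : c ∈ ds <;> simp [hc]

-- the reverse map at key c lists, in dict order, exactly the items whose deps contain c
lemma revMap_getD_aux (c : String) : ∀ (deps : List (String × List String))
    (r : PySem.Dict String (List String)),
    (deps.foldl (fun r p => (PySem.List.dedup p.2).foldl (fun r dp => r.modify dp [] (· ++ [p.1])) r) r).getD c []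
      = r.getD c [] ++ (deps.filter (fun p => decide (c ∈ p.2))).map Prod.fst := by
  intro deps
  induction deps with
  | nil => simp
  | cons p l ih =>
    intro r
    rw [List.foldl_cons, ih, revMap_inner _ _ _ _ (PySem.List.nodup_dedup p.2)]
    rw [List.filter_cons]
    by_cases hc : c ∈ p.2 <;> simp [hc, List.append_assoc]

lemma revMap_getD (deps : List (String × List String)) (c : String) :
    (revMap deps).getD c [] = (deps.filter (fun p => decide (c ∈ p.2))).map Prod.fst := by
  unfold revMap
  rw [revMap_getD_aux]
  simp [PySem.Dict.getD_empty]

-- scanning rev[current] with the member set finds the same item as A's full rescan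
lemma find_eq (c : String) (chain inChain : List String) (h : ∀ x, x ∈ inChain ↔ x ∈ chain) :
    ∀ (deps : List (String × List String)),
    ((deps.filter (fun p => decide (c ∈ p.2))).map Prod.fst).find? (fun x => !decide (x ∈ inChain))
      = (deps.find? (fun p => !decide (p.1 ∈ chain) && decide (c ∈ p.2))).map Prod.fst := by
  intro deps
  induction deps with
  | nil => simp
  | cons p l ih =>
    rw [List.filter_cons, List.find?_cons]
    by_cases hc : c ∈ p.2
    · simp only [hc, decide_true, if_pos, List.map_cons, List.find?_cons]
      by_cases hm : p.1 ∈ chain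
      · have hm' : p.1 ∈ inChain := (h p.1).mpr hm
        simp [hm, hm', ih]
      · have hm' : p.1 ∉ inChain := fun hx => hm ((h p.1).mp hx)
        simp [hm, hm']
    · simp [hc, ih]

lemma loop_eq (deps : List (String × List String)) :
    ∀ (fuel : Nat) (chain inChain : List String), (∀ x, x ∈ inChain ↔ x ∈ chain) →
    chainLoopB (revMap deps) fuel chain inChain = chainLoopA deps fuel chain := by
  intro fuel
  induction fuel with
  | zero => intro chain inChain _; rfl
  | succ n ih =>
    intro chain inChain h
    unfold chainLoopA chainLoopB
    rw [revMap_getD, find_eq (chain.getLastD "") chain inChain h]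
    cases hf : deps.find? (fun p => !decide (p.1 ∈ chain) && decide (chain.getLastD "" ∈ p.2)) with
    | none => rfl
    | some p =>
      simp only [Option.map_some]
      by_cases hp : p.1 = ""
      · simp only [hp, if_pos]
      · simp only [if_neg hp]
        exact ih (chain ++ [p.1]) (PySem.Set.add inChain p.1) (by
          intro x
          rw [PySem.Set.mem_add, List.mem_append, List.mem_singleton, h x])

-- ===== VERDICT (by name: the statement is the Claim_ definition above) =====
theorem build_dependency_chain_spec : Claim_equal_build_dependency_chain := by
  intro deps _
  unfold Spec_build_dependency_chain build_dependency_chain build_dependency_chain_alt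
  cases h : deps.find? (fun p => p.2.isEmpty) with
  | none => rfl
  | some p =>
    by_cases hp : p.1 = ""
    · simp only [hp, if_pos]
    · simp only [if_neg hp]
      exact (loop_eq deps deps.length [p.1] (PySem.Set.ofList [p.1]) (by
        intro x
        rw [PySem.Set.mem_ofList])).symm
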